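-- pv_equiv track=rewrite | github.com/alisonstark/OD-translator | src/core/detector.py | _match_indicators
-- ===== SOURCE A (Python) =====
-- from typing import Any, Dict, List, Set
--
-- def _match_indicators(command_lower: str, indicators: List[str]) -> List[str]:
--     seen = set()
--     matches = []
--     for indicator in indicators:
--         if indicator.lower() not in command_lower:
--             continue
--         if indicator in seen:
--             continue
--         seen.add(indicator)
--         matches.append(indicator)
--     return matches
-- ===== SOURCE B (Python) =====
-- def _match_indicators(command_lower: str, indicators):
--     # Multi-pattern scan with a first-character index: bucket the lowered
--     # patterns by their first character, walk the command once and at each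
--     # position prefix-test only the bucket of that character; then emit hit
--     # indicators in order, deduping by membership in the output list itself.
--     buckets = {}
--     for ind in indicators:
--         low = ind.lower()
--         if low != '':
--             buckets.setdefault(low[0], []).append(low)
--     hit = set()
--     for i, c in enumerate(command_lower):
--         for low in buckets.get(c, []):
--             if command_lower.startswith(low, i):
--                 hit.add(low)
--     matches = []
--     for ind in indicators:
--         low = ind.lower()
--         if (low == '' or low in hit) and ind not in matches:
--             matches.append(ind)
--     return matches
-- ===== Notes on version B (the rewrite author's own statement) =====
-- stated objective: alternative
-- what changed: Replaces the per-indicator substring search with seen-set dedup by a multi-pattern scan: lowered patterns are bucketed by first character into a dict, the command is scanned once prefix-testing only the matching bucket at each position, and hit indicators are then emitted in order, deduping by membership in the output list itself.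
import Mathlib
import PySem

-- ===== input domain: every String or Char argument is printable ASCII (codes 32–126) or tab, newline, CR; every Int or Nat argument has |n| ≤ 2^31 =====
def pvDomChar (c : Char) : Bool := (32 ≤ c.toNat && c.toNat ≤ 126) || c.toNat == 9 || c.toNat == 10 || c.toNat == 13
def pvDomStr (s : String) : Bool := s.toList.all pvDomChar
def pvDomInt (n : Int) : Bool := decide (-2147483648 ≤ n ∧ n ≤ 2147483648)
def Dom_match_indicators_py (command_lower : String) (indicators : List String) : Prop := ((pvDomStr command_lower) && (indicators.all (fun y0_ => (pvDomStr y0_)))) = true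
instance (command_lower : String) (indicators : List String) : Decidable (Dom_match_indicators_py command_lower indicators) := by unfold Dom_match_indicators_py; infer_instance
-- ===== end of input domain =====

-- B replaces A's per-indicator substring search with a first-character index: it buckets the
-- lowered patterns by first character, scans the command once prefix-testing only the bucket
-- at each position, then emits hit indicators in order, deduping by membership in the output
-- list itself (objective: alternative).

-- ===== PORT A =====
def match_indicators_py (command_lower : String) (indicators : List String) : List String :=
  (indicators.foldl
    (fun st indicator =>
      if PySem.Str.isIn (PySem.Str.lower indicator) command_lower = false then st
      else if PySem.Set.contains st.1 indicator then st
      else (PySem.Set.add st.1 indicator, st.2 ++ [indicator]))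
    ((PySem.Set.empty : PySem.Set String), ([] : List String))).2

-- ===== PORT B =====
-- phase 1 of Source B: bucket the lowered patterns by their first character
-- ('low[0]' on a string the guard keeps nonempty is ported as 'toList.headD')
def pvBuckets (indicators : List String) : PySem.Dict Char (List String) :=
  indicators.foldl
    (fun b ind =>
      if PySem.Str.lower ind ≠ "" then
        PySem.Dict.modify b ((PySem.Str.lower ind).toList.headD ' ') []
          (· ++ [PySem.Str.lower ind])
      else b)
    PySem.Dict.empty

-- phase 2 of Source B: the single scan of the command building the 'hit' set
-- ('command_lower.startswith(low, i)' with 0 ≤ i is exactly the prefix test on 'command_lower[i:]')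
def pvHit (command_lower : String) (indicators : List String) : PySem.Set String :=
  (PySem.List.enumerate command_lower.toList 0).foldl
    (fun h p =>
      (PySem.Dict.getD (pvBuckets indicators) p.2 []).foldl
        (fun h low =>
          if PySem.Str.startswith (PySem.Str.slice command_lower (some p.1) none) low
          then PySem.Set.add h low else h) h)
    (PySem.Set.empty : PySem.Set String)

-- phase 3 of Source B: emit hit indicators in order, deduping against the output itself
def match_indicators_py_alt (command_lower : String) (indicators : List String) : List String :=
  indicators.foldl
    (fun ms ind =>
      if ((PySem.Str.lower ind == "") ||
            PySem.Set.contains (pvHit command_lower indicators) (PySem.Str.lower ind))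
          && !(ms.contains ind)
      then ms ++ [ind] else ms)
    ([] : List String)

-- ===== PRECONDITION & SPEC =====
def Spec_match_indicators_py (command_lower : String) (indicators : List String) (out : List String) : Prop := out = match_indicators_py_alt command_lower indicators
instance (command_lower : String) (indicators : List String) (out : List String) : Decidable (Spec_match_indicators_py command_lower indicators out) := by unfold Spec_match_indicators_py; infer_instance

-- ===== CLAIM (what is proved, stated in full; the proofs are below) =====
def Claim_equal_match_indicators_py : Prop := ∀ (command_lower : String) (indicators : List String), Dom_match_indicators_py command_lower indicators → Spec_match_indicators_py command_lower indicators (match_indicators_py command_lower indicators)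

-- ===== LEMMAS AND PROOFS =====

-- membership in the inner fold of pvHit
theorem pv_mem_inner (q : String → Bool) (l : List String) :
    ∀ (h0 : PySem.Set String) (y : String),
      (y ∈ l.foldl (fun h low => if q low then PySem.Set.add h low else h) h0) ↔
        (y ∈ h0 ∨ (y ∈ l ∧ q y = true)) := by
  induction l with
  | nil => intro h0 y; simp
  | cons x xs ih =>
    intro h0 y
    rw [List.foldl_cons]
    by_cases hq : q x = true
    · rw [if_pos hq, ih]
      rw [PySem.Set.mem_add]
      constructor
      · rintro ((h | h) | h)
        · exact Or.inl h
        · subst h; exact Or.inr ⟨List.mem_cons_self, hq⟩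
        · exact Or.inr ⟨List.mem_cons_of_mem x h.1, h.2⟩
      · rintro (h | ⟨hm, hqy⟩)
        · exact Or.inl (Or.inl h)
        · rcases List.mem_cons.1 hm with h | h
          · subst h; exact Or.inl (Or.inr rfl)
          · exact Or.inr ⟨h, hqy⟩
    · rw [if_neg hq, ih]
      constructor
      · rintro (h | h)
        · exact Or.inl h
        · exact Or.inr ⟨List.mem_cons_of_mem x h.1, h.2⟩
      · rintro (h | ⟨hm, hqy⟩)
        · exact Or.inl h
        · rcases List.mem_cons.1 hm with h | h
          · subst h; exact absurd hqy hq
          · exact Or.inr ⟨h, hqy⟩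

-- membership in the outer scan of pvHit
theorem pv_mem_scan {α : Type} (g : α → List String) (q : α → String → Bool) :
    ∀ (l : List α) (h0 : PySem.Set String) (y : String),
      (y ∈ l.foldl (fun h a => (g a).foldl (fun h low => if q a low then PySem.Set.add h low else h) h) h0) ↔
        (y ∈ h0 ∨ ∃ a ∈ l, y ∈ g a ∧ q a y = true) := by
  intro l
  induction l with
  | nil => intro h0 y; simp
  | cons a l ih =>
    intro h0 y
    rw [List.foldl_cons, ih, pv_mem_inner]
    constructor
    · rintro ((h | h) | ⟨b, hb, h⟩)
      · exact Or.inl h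
      · exact Or.inr ⟨a, List.mem_cons_self, h⟩
      · exact Or.inr ⟨b, List.mem_cons_of_mem a hb, h⟩
    · rintro (h | ⟨b, hb, h⟩)
      · exact Or.inl (Or.inl h)
      · rcases List.mem_cons.1 hb with rfl | hb
        · exact Or.inl (Or.inr h)
        · exact Or.inr ⟨b, hb, h⟩

-- what ends up in a bucket
theorem pv_mem_bucket (inds : List String) (c : Char) (y : String) :
    y ∈ PySem.Dict.getD (pvBuckets inds) c [] ↔
      ((∃ ind ∈ inds, PySem.Str.lower ind = y) ∧ y ≠ "" ∧ y.toList.headD ' ' = c) := by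
  unfold pvBuckets
  rw [PySem.List.foldl_ite_eq_foldl_filter]
  rw [show (inds.filter (fun ind => decide (PySem.Str.lower ind ≠ ""))).foldl
        (fun b ind => PySem.Dict.modify b ((PySem.Str.lower ind).toList.headD ' ') []
          (· ++ [PySem.Str.lower ind])) PySem.Dict.empty
      = ((inds.filter (fun ind => decide (PySem.Str.lower ind ≠ ""))).map
          (fun ind => (((PySem.Str.lower ind).toList.headD ' '), PySem.Str.lower ind))).foldl
        (fun d p => PySem.Dict.modify d p.1 [] (· ++ [p.2])) PySem.Dict.empty from
      by rw [List.foldl_map]]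
  rw [PySem.Dict.getD_foldl_modify_append, PySem.Dict.getD_empty, List.nil_append]
  constructor
  · intro hy
    obtain ⟨p, hp, hpy⟩ := List.mem_map.1 hy
    obtain ⟨hp1, hpc⟩ := List.mem_filter.1 hp
    obtain ⟨ind, hindf, hg⟩ := List.mem_map.1 hp1
    obtain ⟨hind, hne⟩ := List.mem_filter.1 hindf
    have hne' : PySem.Str.lower ind ≠ "" := of_decide_eq_true hne
    subst hg
    subst hpy
    refine ⟨⟨ind, hind, rfl⟩, hne', ?_⟩
    exact eq_of_beq hpc
  · rintro ⟨⟨ind, hind, rfl⟩, hne, hc⟩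
    refine List.mem_map.2 ⟨((PySem.Str.lower ind).toList.headD ' ', PySem.Str.lower ind), ?_, rfl⟩
    refine List.mem_filter.2 ⟨?_, ?_⟩
    · exact List.mem_map.2 ⟨ind, List.mem_filter.2 ⟨hind, decide_eq_true hne⟩, rfl⟩
    · exact beq_iff_eq.2 hc

-- a nonempty string is in pvHit iff it is some indicator's lowercase and occurs in the command
theorem pv_hit_iff (cmd : String) (inds : List String) (y : String) :
    PySem.Set.contains (pvHit cmd inds) y = true ↔
      ((∃ ind ∈ inds, PySem.Str.lower ind = y) ∧ y ≠ "" ∧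
        PySem.Str.isIn y cmd = true) := by
  rw [PySem.Set.contains_iff]
  unfold pvHit
  have hscan := pv_mem_scan (α := Int × Char)
      (fun p => PySem.Dict.getD (pvBuckets inds) p.2 [])
      (fun p low => PySem.Str.startswith (PySem.Str.slice cmd (some p.1) none) low)
      (PySem.List.enumerate cmd.toList 0) PySem.Set.empty y
  beta_reduce at hscan
  rw [hscan]
  simp only [PySem.Set.empty, List.not_mem_nil, false_or]
  have hsw : ∀ i : Int, 0 ≤ i →
      (PySem.Str.startswith (PySem.Str.slice cmd (some i) none) y = true ↔
        y.toList <+: cmd.toList.drop i.toNat) := by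
    intro i h0
    rw [PySem.Str.startswith_eq, PySem.Str.toList_slice, PySem.Chars.slice_eq_listSlice,
      PySem.List.slice_from cmd.toList h0, PySem.Chars.startswith_iff]
  constructor
  · rintro ⟨p, hp, hb, hs⟩
    obtain ⟨⟨ind, hind, rfl⟩, hne, hc⟩ := (pv_mem_bucket inds p.2 y).1 hb
    obtain ⟨k, hk, hpk⟩ := (PySem.List.mem_enumerate_iff _ _ _).1 hp
    have h0 : (0 : Int) ≤ p.1 := by rw [hpk]; simp
    have h3 : PySem.Chars.isIn (PySem.Str.lower ind).toList cmd.toList = true :=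
      (PySem.Chars.exists_prefix_drop_iff_isIn _ _).1 ⟨p.1.toNat, (hsw p.1 h0).1 hs⟩
    refine ⟨⟨ind, hind, rfl⟩, hne, ?_⟩
    rw [PySem.Str.isIn_eq]
    exact h3
  · rintro ⟨⟨ind, hind, hlow⟩, hne, hin⟩
    rw [PySem.Str.isIn_eq] at hin
    obtain ⟨j, hj⟩ := (PySem.Chars.exists_prefix_drop_iff_isIn _ _).2 hin
    obtain ⟨c, rest, hy⟩ : ∃ c rest, y.toList = c :: rest := by
      cases hyl : y.toList with
      | nil =>
        exfalso
        apply hne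
        have : y.toList = "".toList := by simpa using hyl
        exact String.toList_inj.1 this
      | cons c rest => exact ⟨c, rest, rfl⟩
    obtain ⟨t, ht⟩ := hj
    have hjlt : j < cmd.toList.length := by
      by_contra hge
      rw [List.drop_eq_nil_of_le (by omega)] at ht
      rw [hy] at ht
      simp at ht
    have hcj : cmd.toList[j] = c := by
      have h2 : cmd.toList.drop j = c :: (rest ++ t) := by
        rw [← ht, hy]; simp
      have h3 : cmd.toList[j]? = some c := by
        rw [← List.head?_drop, h2]; rfl
      rw [List.getElem?_eq_getElem hjlt] at h3
      exact Option.some.inj h3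
    refine ⟨((j : Int), cmd.toList[j]), ?_, ?_, ?_⟩
    · exact (PySem.List.mem_enumerate_iff _ _ _).2 ⟨j, hjlt, by simp⟩
    · refine (pv_mem_bucket inds _ y).2 ⟨⟨ind, hind, hlow⟩, hne, ?_⟩
      rw [hy, hcj]
      rfl
    · show PySem.Str.startswith (PySem.Str.slice cmd (some ((j : Nat) : Int)) none) y = true
      rw [hsw _ (by positivity), Int.toNat_natCast]
      exact ⟨t, ht⟩

-- A's loop with equal components equals B's output loop when the tests agree on the list
theorem pv_loops_eq (cmd : String) (Q : String → Bool) :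
    ∀ (xs : List String) (s : List String),
      (∀ ind ∈ xs, Q ind = PySem.Str.isIn (PySem.Str.lower ind) cmd) →
      (xs.foldl
        (fun st indicator =>
          if PySem.Str.isIn (PySem.Str.lower indicator) cmd = false then st
          else if PySem.Set.contains st.1 indicator then st
          else (PySem.Set.add st.1 indicator, st.2 ++ [indicator]))
        (s, s))
      = (xs.foldl (fun ms ind => if Q ind && !(ms.contains ind) then ms ++ [ind] else ms) s,
         xs.foldl (fun ms ind => if Q ind && !(ms.contains ind) then ms ++ [ind] else ms) s) := by
  intro xs
  induction xs with
  | nil => intro s _; simp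
  | cons x xs ih =>
    intro s hq
    have hx : Q x = PySem.Str.isIn (PySem.Str.lower x) cmd :=
      hq x List.mem_cons_self
    have hq' : ∀ ind ∈ xs, Q ind = PySem.Str.isIn (PySem.Str.lower ind) cmd :=
      fun ind h => hq ind (List.mem_cons_of_mem x h)
    rw [List.foldl_cons, List.foldl_cons]
    cases hm : PySem.Str.isIn (PySem.Str.lower x) cmd with
    | false =>
      rw [hm] at hx
      simpa [hx] using ih s hq'
    | true =>
      rw [hm] at hx
      have hcs : PySem.Set.contains s x = s.contains x := by
        by_cases h : x ∈ s
        · rw [(PySem.Set.contains_iff s x).2 h, (List.contains_iff_mem).2 h]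
        · rw [Bool.eq_iff_iff]
          constructor
          · intro hc; exact absurd ((PySem.Set.contains_iff s x).1 hc) h
          · intro hc; exact absurd (List.contains_iff_mem.1 hc) h
      cases hc : s.contains x with
      | true =>
        have hs' : x ∈ s := List.contains_iff_mem.1 hc
        simpa [hx, hs'] using ih s hq'
      | false =>
        have hs' : x ∉ s := fun h => by
          rw [List.contains_iff_mem.2 h] at hc; cases hc
        simpa [hx, hs', PySem.Set.add, hcs, hc] using ih (s ++ [x]) hq'

-- ===== VERDICT (by name: the statement is the Claim_ definition above) =====
theorem match_indicators_py_spec : Claim_equal_match_indicators_py := by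
  intro cmd inds _
  unfold Spec_match_indicators_py match_indicators_py match_indicators_py_alt
  have hq : ∀ ind ∈ inds,
      ((PySem.Str.lower ind == "") ||
        PySem.Set.contains (pvHit cmd inds) (PySem.Str.lower ind))
      = PySem.Str.isIn (PySem.Str.lower ind) cmd := by
    intro ind hmem
    by_cases hl : PySem.Str.lower ind = ""
    · rw [hl]
      have : PySem.Str.isIn "" cmd = true := by
        rw [PySem.Str.isIn_eq]
        have : ("" : String).toList = [] := rfl
        rw [this]
        exact PySem.Chars.isIn_nil cmd.toList
      rw [this]
      simp
    · have hbe : (PySem.Str.lower ind == "") = false := by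
        simpa using hl
      rw [hbe, Bool.false_or]
      by_cases h : PySem.Str.isIn (PySem.Str.lower ind) cmd = true
      · rw [h, (pv_hit_iff cmd inds (PySem.Str.lower ind)).2 ⟨⟨ind, hmem, rfl⟩, hl, h⟩]
      · rw [Bool.eq_false_iff.2 h, Bool.eq_false_iff]
        intro hc
        exact h ((pv_hit_iff cmd inds (PySem.Str.lower ind)).1 hc).2.2
  have := pv_loops_eq cmd
      (fun ind => (PySem.Str.lower ind == "") ||
        PySem.Set.contains (pvHit cmd inds) (PySem.Str.lower ind))
      inds [] hq
  rw [show (PySem.Set.empty : PySem.Set String) = [] from rfl, this]
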